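-- pv_equiv track=rewrite | github.com/guoliangxd/interview | huawei/Python/validCode.py | charValid
-- ===== SOURCE A (Python) =====
-- def charValid(str_):
--     num1 = 0
--     num2 = 0
--     num3 = 0
--     num4 = 0
--     for char in str_:
--         if char >= 'a' and char <= 'z':
--             num1 = 1
--         elif char >= 'A' and char <= 'Z':
--             num2 = 1
--         elif char >= '0' and char <= '9':
--             num3 = 1
--         else:
--             num4 = 1
--     if num1 + num2 + num3 + num4 >= 3:
--         return True
--     else:
--         return False
-- ===== SOURCE B (Python) =====
-- def charValid(str_):
--     c1 = any('a' <= ch <= 'z' for ch in str_)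
--     c2 = any('A' <= ch <= 'Z' for ch in str_)
--     c3 = any('0' <= ch <= '9' for ch in str_)
--     c4 = any(not ('a' <= ch <= 'z' or 'A' <= ch <= 'Z' or '0' <= ch <= '9') for ch in str_)
--     return c1 + c2 + c3 + c4 >= 3
-- ===== Notes on version B (the rewrite author's own statement) =====
-- stated objective: simpler
-- what changed: Replaces A's single flag-mutating pass and elif chain with four independent any() presence scans (one per category, 'other' as the exact complement) summed and compared to 3.
import Mathlib
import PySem

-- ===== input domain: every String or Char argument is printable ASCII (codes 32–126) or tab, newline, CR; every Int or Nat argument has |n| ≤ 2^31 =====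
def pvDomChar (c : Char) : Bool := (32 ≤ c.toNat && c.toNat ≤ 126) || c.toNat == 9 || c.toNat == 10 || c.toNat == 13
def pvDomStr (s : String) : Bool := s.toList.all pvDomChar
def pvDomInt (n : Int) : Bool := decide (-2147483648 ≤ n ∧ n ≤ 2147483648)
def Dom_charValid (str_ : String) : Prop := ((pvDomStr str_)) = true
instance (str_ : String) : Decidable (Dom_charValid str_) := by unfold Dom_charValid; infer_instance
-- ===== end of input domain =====

-- B replaces A's single flag-mutating pass with four independent per-category any-scans; objective: simpler.


-- ===== PORT A =====
-- literal transliteration: one pass updating four 0/1 flags via an elif chain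
def charValidLoop (st : Int × Int × Int × Int) (cs : List Char) : Int × Int × Int × Int :=
  cs.foldl (fun (st : Int × Int × Int × Int) (char : Char) =>
    let (num1, num2, num3, num4) := st
    if 'a' ≤ char ∧ char ≤ 'z' then (1, num2, num3, num4)
    else if 'A' ≤ char ∧ char ≤ 'Z' then (num1, 1, num3, num4)
    else if '0' ≤ char ∧ char ≤ '9' then (num1, num2, 1, num4)
    else (num1, num2, num3, 1)) st

def charValid (str_ : String) : Bool :=
  let (num1, num2, num3, num4) := charValidLoop (0, 0, 0, 0) str_.toList
  if num1 + num2 + num3 + num4 ≥ 3 then true else false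

-- ===== PORT B =====
-- four independent presence scans, then count the categories present
def charValid_alt (str_ : String) : Bool :=
  let cs := str_.toList
  let c1 := cs.any (fun ch => 'a' ≤ ch && ch ≤ 'z')
  let c2 := cs.any (fun ch => 'A' ≤ ch && ch ≤ 'Z')
  let c3 := cs.any (fun ch => '0' ≤ ch && ch ≤ '9')
  let c4 := cs.any (fun ch => !(('a' ≤ ch && ch ≤ 'z') || ('A' ≤ ch && ch ≤ 'Z') || ('0' ≤ ch && ch ≤ '9')))
  (cond c1 (1:Int) 0) + (cond c2 1 0) + (cond c3 1 0) + (cond c4 1 0) ≥ 3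

-- ===== PRECONDITION & SPEC =====
def Spec_charValid (str_ : String) (out : Bool) : Prop := out = charValid_alt str_
instance (str_ : String) (out : Bool) : Decidable (Spec_charValid str_ out) := by unfold Spec_charValid; infer_instance

-- ===== CLAIM (what is proved, stated in full; the proofs are below) =====
def Claim_equal_charValid : Prop := ∀ (str_ : String), Dom_charValid str_ → Spec_charValid str_ (charValid str_)

-- ===== LEMMAS AND PROOFS =====
theorem charValidLoop_eq (cs : List Char) (a b c d : Int) :
    charValidLoop (a, b, c, d) cs =
      ((if cs.any (fun ch => 'a' ≤ ch && ch ≤ 'z') then 1 else a),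
       (if cs.any (fun ch => 'A' ≤ ch && ch ≤ 'Z') then 1 else b),
       (if cs.any (fun ch => '0' ≤ ch && ch ≤ '9') then 1 else c),
       (if cs.any (fun ch => !(('a' ≤ ch && ch ≤ 'z') || ('A' ≤ ch && ch ≤ 'Z') || ('0' ≤ ch && ch ≤ '9'))) then 1 else d)) := by
  induction cs generalizing a b c d with
  | nil => simp [charValidLoop]
  | cons ch cs ih =>
    simp only [charValidLoop, List.foldl_cons, List.any_cons] at *
    by_cases h1 : ('a' ≤ ch ∧ ch ≤ 'z')
    · have n2 : ¬('A' ≤ ch ∧ ch ≤ 'Z') := fun h => absurd (le_trans h1.1 h.2) (by decide)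
      have n3 : ¬('0' ≤ ch ∧ ch ≤ '9') := fun h => absurd (le_trans h1.1 h.2) (by decide)
      simp [h1, n2, n3, ih]
    · by_cases h2 : ('A' ≤ ch ∧ ch ≤ 'Z')
      · have n3 : ¬('0' ≤ ch ∧ ch ≤ '9') := fun h => absurd (le_trans h2.1 h.2) (by decide)
        simp [h1, h2, n3, ih]
      · by_cases h3 : ('0' ≤ ch ∧ ch ≤ '9')
        · simp [h1, h2, h3, ih]
        · simp [h1, h2, h3, ih]

-- ===== VERDICT (by name: the statement is the Claim_ definition above) =====
theorem charValid_spec : Claim_equal_charValid := by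
  intro str_ _
  unfold Spec_charValid charValid charValid_alt
  dsimp only
  rw [charValidLoop_eq]
  generalize str_.toList.any (fun ch => 'a' ≤ ch && ch ≤ 'z') = b1
  generalize str_.toList.any (fun ch => 'A' ≤ ch && ch ≤ 'Z') = b2
  generalize str_.toList.any (fun ch => '0' ≤ ch && ch ≤ '9') = b3
  generalize str_.toList.any (fun ch => !(('a' ≤ ch && ch ≤ 'z') || ('A' ≤ ch && ch ≤ 'Z') || ('0' ≤ ch && ch ≤ '9'))) = b4
  cases b1 <;> cases b2 <;> cases b3 <;> cases b4 <;> decide
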